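-- pv_equiv track=rewrite | github.com/walshd/web-teaching-environment | src/wte/util.py | ordered_counted_set
-- ===== SOURCE A (Python) =====
-- def ordered_counted_set(items):
--     """Returns a list of ``(item, count)`` tuples derived from the ``items``.
--     Each unique item is listed once with the number of times it appears in
--     the ``items`` The unique items are ordered in the same order in which
--     they appear in the ``items``.
--
--     :param items: The list of items to create the ordered, counted set for
--     :type items: :func:`list`
--     :return: A list of unique items with their frequency counts
--     :r_type: :func:`list` of :func:`tuple`
--     """
--     categories = []
--     counts = []
--     for item in items:
--         if item in categories:
--             idx = categories.index(item)
--             counts[idx] = counts[idx] + 1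
--         else:
--             categories.append(item)
--             counts.append(1)
--     return zip(categories, counts)
-- ===== SOURCE B (Python) =====
-- def ordered_counted_set(items):
--     """Two staged passes: first collect the unique items in order of first
--     appearance, then count each of them over the whole input with
--     list.count.  List membership keeps unhashable items working."""
--     items = list(items)
--     categories = []
--     for item in items:
--         if item not in categories:
--             categories.append(item)
--     return zip(categories, [items.count(c) for c in categories])
-- ===== Notes on version B (the rewrite author's own statement) =====
-- stated objective: alternative
-- what changed: A interleaves dedup and counting in one loop, updating counts[categories.index(item)] as it goes; B splits the task into two staged passes: first build the ordered unique list, then compute each count with a separate items.count scan per category.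
import Mathlib
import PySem

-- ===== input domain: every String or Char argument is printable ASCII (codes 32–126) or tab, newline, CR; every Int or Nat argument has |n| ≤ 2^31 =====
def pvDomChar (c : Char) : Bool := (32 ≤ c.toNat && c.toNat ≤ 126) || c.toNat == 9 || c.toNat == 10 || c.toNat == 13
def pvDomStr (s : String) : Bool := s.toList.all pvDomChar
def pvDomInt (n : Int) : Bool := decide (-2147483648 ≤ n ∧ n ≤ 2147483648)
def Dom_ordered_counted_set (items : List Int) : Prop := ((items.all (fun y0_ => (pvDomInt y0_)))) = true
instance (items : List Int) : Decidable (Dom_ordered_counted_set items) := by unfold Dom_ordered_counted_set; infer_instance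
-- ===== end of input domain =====

-- B replaces A's single interleaved dedup+count loop (counts updated at list.index(item)) with two staged passes: build the ordered unique list, then count each category over the whole input; same values, similar cost (objective: alternative).


-- ===== PORT A =====
-- one loop step of A: dedup and count maintained together, counts updated at list.index(item)
def ocsStep (st : List Int × List Int) (item : Int) : List Int × List Int :=
  if item ∈ st.1 then
    -- categories.index(item): in this branch index? is always `some`, so getD 0 is exact
    let idx : Nat := (PySem.List.index? st.1 item).getD 0
    (st.1, PySem.List.pySetD st.2 (idx : Int) (PySem.List.pyGetD st.2 (idx : Int) 0 + 1))
  else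
    (st.1 ++ [item], st.2 ++ [1])

def ordered_counted_set (items : List Int) : List (Int × Int) :=
  let st := items.foldl ocsStep ([], [])
  st.1.zip st.2

-- ===== PORT B =====
def ordered_counted_set_alt (items : List Int) : List (Int × Int) :=
  -- pass 1: ordered unique list by appending each item not already present
  let categories := items.foldl (fun acc item => if item ∈ acc then acc else acc ++ [item]) []
  -- pass 2: [items.count(c) for c in categories], then zip
  categories.zip (categories.map (fun c => (PySem.List.count items c : Int)))

-- ===== PRECONDITION & SPEC =====
def Spec_ordered_counted_set (items : List Int) (out : List (Int × Int)) : Prop := out = ordered_counted_set_alt items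
instance (items : List Int) (out : List (Int × Int)) : Decidable (Spec_ordered_counted_set items out) := by unfold Spec_ordered_counted_set; infer_instance

-- ===== CLAIM (what is proved, stated in full; the proofs are below) =====
def Claim_equal_ordered_counted_set : Prop := ∀ (items : List Int), Dom_ordered_counted_set items → Spec_ordered_counted_set items (ordered_counted_set items)

-- ===== LEMMAS AND PROOFS =====
-- the categories list both sides maintain: ordered list of first occurrences
def ocsU (p : List Int) : List Int :=
  p.foldl (fun acc item => if item ∈ acc then acc else acc ++ [item]) []

lemma ocsU_append (p : List Int) (x : Int) :
    ocsU (p ++ [x]) = if x ∈ ocsU p then ocsU p else ocsU p ++ [x] := by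
  simp [ocsU, List.foldl_append]

lemma mem_ocsU (p : List Int) (a : Int) : a ∈ ocsU p ↔ a ∈ p := by
  induction p using List.reverseRecOn with
  | nil => simp [ocsU]
  | append_singleton p x ih =>
    rw [ocsU_append]
    by_cases hx : x ∈ ocsU p <;> simp [hx, ih]
    aesop

lemma nodup_ocsU (p : List Int) : (ocsU p).Nodup := by
  induction p using List.reverseRecOn with
  | nil => simp [ocsU]
  | append_singleton p x ih =>
    rw [ocsU_append]
    by_cases hx : x ∈ ocsU p <;> simp [hx, List.nodup_append, ih]
    intro a ha h; exact hx (h ▸ ha)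

-- the invariant of A's loop: categories = ordered dedup of the prefix, counts = per-category counts of the prefix
lemma ocs_loop (p : List Int) :
    p.foldl ocsStep ([], []) = (ocsU p, (ocsU p).map (fun c => (List.count c p : Int))) := by
  induction p using List.reverseRecOn with
  | nil => simp [ocsU]
  | append_singleton p x ih =>
    rw [List.foldl_append, ih, ocsU_append]
    by_cases hx : x ∈ ocsU p
    · simp only [List.foldl_cons, List.foldl_nil, ocsStep, hx, if_pos]
      obtain ⟨k, hk⟩ := Option.isSome_iff_exists.mp ((PySem.List.index?_isSome_iff (ocsU p) x).mpr hx)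
      obtain ⟨hklt, hkx, -⟩ := PySem.List.getElem_of_index?_eq_some hk
      rw [hk]
      simp only [Option.getD_some, PySem.List.pySetD_natCast, PySem.List.pyGetD_natCast]
      refine Prod.ext rfl ?_
      have hlen : ((ocsU p).map (fun c => (List.count c p : Int))).length = (ocsU p).length :=
        List.length_map ..
      have hget : ((ocsU p).map (fun c => (List.count c p : Int))).getD k 0 = (List.count x p : Int) := by
        rw [List.getD_eq_getElem _ _ (by omega), List.getElem_map, hkx]
      rw [hget]
      apply List.ext_getElem (by simp)
      intro j hj hj'
      rw [List.getElem_set, List.getElem_map]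
      by_cases hjk : k = j
      · subst hjk
        simp [hkx, List.count_append]
      · have hjlen : j < (ocsU p).length := by simpa using hj'
        have hne : ¬ x = (ocsU p)[j]'hjlen := by
          intro h
          exact hjk ((nodup_ocsU p).getElem_inj_iff.mp (hkx.trans h))
        simp [hjk, List.count_append, List.count_cons, hne, List.getElem_map]
    · simp only [List.foldl_cons, List.foldl_nil, ocsStep, hx, if_false, List.map_append]
      refine Prod.ext rfl ?_
      have hxp : x ∉ p := fun h => hx ((mem_ocsU p x).mpr h)
      refine congrArg₂ (· ++ ·) ?_ ?_
      · symm
        apply List.map_congr_left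
        intro c hc
        have hne : ¬ x = c := fun h => hx (h ▸ hc)
        simp [List.count_append, hne]
      · simp [List.count_append, List.count_eq_zero.mpr hxp]

-- ===== VERDICT (by name: the statement is the Claim_ definition above) =====
theorem ordered_counted_set_spec : Claim_equal_ordered_counted_set := by
  intro items _
  unfold Spec_ordered_counted_set ordered_counted_set ordered_counted_set_alt
  rw [ocs_loop]
  show (ocsU items).zip ((ocsU items).map fun c => (List.count c items : Int))
      = (ocsU items).zip ((ocsU items).map fun c => (PySem.List.count items c : Int))
  simp [PySem.List.count_eq]
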